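-- pv_equiv track=rewrite | github.com/pypi-data/pypi-mirror-401 | packages/bloqade-circuit/bloqade_circuit-0.10.6-py3-none-any.whl/bloqade/qasm2/dialects/noise/model.py | deconflict
-- ===== SOURCE A (Python) =====
-- def deconflict(
--     ctrls: list[int], qargs: list[int]
-- ) -> list[tuple[tuple[int, ...], tuple[int, ...]]]:
--     """Return a list of groups of ctrl and qarg qubits that can be moved and entangled separately."""
--     # sort by ctrl qubit first to guarantee that they will be in ascending order
--     sorted_pairs = sorted(zip(ctrls, qargs))
--
--     groups: list[list[tuple[int, int]]] = []
--     # group by qarg only putting it in a group if the qarg is greater than the last qarg in the group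
--     # thus ensuring that the qargs are in ascending order
--     while len(sorted_pairs) > 0:
--         ctrl, qarg = sorted_pairs.pop(0)
--
--         found = False
--         for group in groups:
--             if group[-1][1] < qarg:
--                 group.append((ctrl, qarg))
--                 found = True
--                 break
--         if not found:
--             groups.append([(ctrl, qarg)])
--
--     new_groups: list[tuple[tuple[int, ...], tuple[int, ...]]] = []
--
--     for group in groups:
--         ctrl, qarg = zip(*group)
--         ctrl = tuple(ctrl)
--         qarg = tuple(qarg)
--         new_groups.append((ctrl, qarg))
--
--     return new_groups
-- ===== SOURCE B (Python) =====
-- def deconflict(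
--     ctrls: list[int], qargs: list[int]
-- ) -> list[tuple[tuple[int, ...], tuple[int, ...]]]:
--     """Return a list of groups of ctrl and qarg qubits that can be moved and entangled separately."""
--     pairs = sorted(zip(ctrls, qargs))
--     groups: list[tuple[list[int], list[int]]] = []
--     lasts: list[int] = []  # lasts[i] = last qarg of group i; always non-increasing
--     for c, q in pairs:
--         # binary search for the first group whose last qarg is < q
--         lo, hi = 0, len(lasts)
--         while lo < hi:
--             mid = (lo + hi) // 2
--             if lasts[mid] < q:
--                 hi = mid
--             else:
--                 lo = mid + 1
--         if lo == len(lasts):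
--             groups.append(([c], [q]))
--             lasts.append(q)
--         else:
--             cs, qs = groups[lo]
--             cs.append(c)
--             qs.append(q)
--             lasts[lo] = q
--     return [(tuple(cs), tuple(qs)) for cs, qs in groups]
-- ===== Notes on version B (the rewrite author's own statement) =====
-- stated objective: faster
-- what changed: Replaces A's pop(0) while-loop and linear first-fit scan over all groups with a single for-loop that keeps the list of group-last-qargs (always non-increasing) and binary-searches it for the first group whose last qarg is smaller, appending to per-group ctrl/qarg lists directly.
import Mathlib
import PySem

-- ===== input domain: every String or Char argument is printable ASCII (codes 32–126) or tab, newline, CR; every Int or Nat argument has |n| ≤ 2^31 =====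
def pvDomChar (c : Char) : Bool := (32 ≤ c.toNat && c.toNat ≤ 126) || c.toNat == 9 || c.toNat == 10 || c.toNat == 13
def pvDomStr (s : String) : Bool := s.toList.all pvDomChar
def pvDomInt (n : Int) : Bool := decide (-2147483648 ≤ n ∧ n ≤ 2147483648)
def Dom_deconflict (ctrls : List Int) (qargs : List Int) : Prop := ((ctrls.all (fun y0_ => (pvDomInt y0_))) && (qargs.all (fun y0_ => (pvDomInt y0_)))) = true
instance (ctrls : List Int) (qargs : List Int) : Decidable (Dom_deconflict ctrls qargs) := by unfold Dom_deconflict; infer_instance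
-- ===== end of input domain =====

-- B replaces A's pop(0) loop + linear first-fit scan over groups by a single pass with a
-- binary search over the (always non-increasing) list of group-last-qargs: O(n log n) vs O(n^2).

-- ===== PORT A =====
-- A's inner `for group in groups` first-fit scan (group[-1] ported as getLastD: groups are never empty)
def aInsert (p : Int × Int) : List (List (Int × Int)) → List (List (Int × Int))
  | [] => [[p]]
  | g :: gs => if (g.getLastD (0, 0)).2 < p.2 then (g ++ [p]) :: gs else g :: aInsert p gs

def deconflict (ctrls : List Int) (qargs : List Int) : List (List Int × List Int) :=
  let sortedPairs := PySem.List.sorted2 (List.zip ctrls qargs) Prod.fst Prod.snd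
  -- while-loop popping from the front = fold over the sorted pairs
  let groups := sortedPairs.foldl (fun gs p => aInsert p gs) []
  -- zip(*group) → the two projections of the group
  groups.map (fun g => (g.map Prod.fst, g.map Prod.snd))

-- ===== PORT B =====
-- Source B's hand-written while-loop binary search (lasts[mid] ported as getD: mid < hi ≤ len)
def bSearch (lasts : List Int) (q : Int) (lo hi : Nat) : Nat :=
  if _h : lo < hi then
    if lasts.getD ((lo + hi) / 2) 0 < q then bSearch lasts q lo ((lo + hi) / 2)
    else bSearch lasts q ((lo + hi) / 2 + 1) hi
  else lo
termination_by hi - lo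
decreasing_by all_goals omega

def bStep (st : List (List Int × List Int) × List Int) (p : Int × Int) :
    List (List Int × List Int) × List Int :=
  let i := bSearch st.2 p.2 0 st.2.length
  if i = st.2.length then
    (st.1 ++ [([p.1], [p.2])], st.2 ++ [p.2])
  else
    (st.1.modify i (fun g => (g.1 ++ [p.1], g.2 ++ [p.2])), st.2.set i p.2)

def deconflict_alt (ctrls : List Int) (qargs : List Int) : List (List Int × List Int) :=
  let pairs := PySem.List.sorted2 (List.zip ctrls qargs) Prod.fst Prod.snd
  (pairs.foldl bStep ([], [])).1

-- ===== PRECONDITION & SPEC =====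
def Spec_deconflict (ctrls : List Int) (qargs : List Int) (out : List (List Int × List Int)) : Prop := out = deconflict_alt ctrls qargs
instance (ctrls : List Int) (qargs : List Int) (out : List (List Int × List Int)) : Decidable (Spec_deconflict ctrls qargs out) := by unfold Spec_deconflict; infer_instance

-- ===== CLAIM (what is proved, stated in full; the proofs are below) =====
def Claim_equal_deconflict : Prop := ∀ (ctrls : List Int) (qargs : List Int), Dom_deconflict ctrls qargs → Spec_deconflict ctrls qargs (deconflict ctrls qargs)

-- ===== LEMMAS AND PROOFS =====

-- last qarg of an A-group
def lastQ (g : List (Int × Int)) : Int := (g.getLastD (0, 0)).2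

-- B's view of A's groups
def absG (G : List (List (Int × Int))) : List (List Int × List Int) :=
  G.map (fun g => (g.map Prod.fst, g.map Prod.snd))

def lastsG (G : List (List (Int × Int))) : List Int := G.map lastQ

-- invariant of A's group list: groups nonempty, last qargs non-increasing
def invG (G : List (List (Int × Int))) : Prop :=
  (∀ g ∈ G, g ≠ []) ∧ G.Pairwise (fun a b => lastQ b ≤ lastQ a)

-- the index A's linear first-fit scan selects
def ff (q : Int) : List Int → Nat
  | [] => 0
  | x :: xs => if x < q then 0 else ff q xs + 1

theorem ff_le (q : Int) (l : List Int) : ff q l ≤ l.length := by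
  induction l with
  | nil => simp [ff]
  | cons x xs ih => simp only [ff, List.length_cons]; split <;> omega

theorem ff_before (q : Int) (l : List Int) (j : Nat) (hj : j < ff q l) :
    ¬ l.getD j 0 < q := by
  induction l generalizing j with
  | nil => simp [ff] at hj
  | cons x xs ih =>
    simp only [ff] at hj
    split at hj
    · omega
    · cases j with
      | zero => simpa using ‹¬ x < q›
      | succ j' => exact ih j' (by omega)

theorem ff_at (q : Int) (l : List Int) (h : ff q l < l.length) :
    l.getD (ff q l) 0 < q := by
  induction l with
  | nil => simp at h
  | cons x xs ih =>
    by_cases hx : x < q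
    · simp [ff, hx]
    · simp only [ff, if_neg hx, List.length_cons] at h
      simpa [ff, if_neg hx] using ih (by omega)

theorem pairwise_getD (l : List Int) (hp : l.Pairwise (fun a b => b ≤ a))
    {i j : Nat} (hij : i ≤ j) (hj : j < l.length) : l.getD j 0 ≤ l.getD i 0 := by
  rcases Nat.lt_or_ge i j with h | h
  · rw [List.getD_eq_getElem l 0 hj, List.getD_eq_getElem l 0 (lt_trans h hj)]
    exact List.pairwise_iff_getElem.mp hp i j (lt_trans h hj) hj h
  · have : i = j := by omega
    subst this; rfl

theorem bSearch_eq (l : List Int) (q : Int) (hp : l.Pairwise (fun a b => b ≤ a)) :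
    ∀ n lo hi, hi - lo = n → hi ≤ l.length → lo ≤ ff q l → ff q l ≤ hi →
    bSearch l q lo hi = ff q l := by
  intro n
  induction n using Nat.strong_induction_on with
  | _ n ih =>
    intro lo hi hn hhi hlo hhi'
    rw [bSearch]
    split
    · rename_i hlt
      have hmid1 : lo ≤ (lo + hi) / 2 := by omega
      have hmid2 : (lo + hi) / 2 < hi := by omega
      split
      · rename_i hcond
        have hff : ff q l ≤ (lo + hi) / 2 := by
          by_contra hc
          exact ff_before q l _ (by omega) hcond
        exact ih ((lo + hi) / 2 - lo) (by omega) lo ((lo + hi) / 2) rfl (by omega) hlo hff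
      · rename_i hcond
        have hff : (lo + hi) / 2 + 1 ≤ ff q l := by
          by_contra hc
          have h1 : ff q l ≤ (lo + hi) / 2 := by omega
          have h2 : ff q l < l.length := by omega
          have h3 := ff_at q l h2
          have h4 := pairwise_getD l hp h1 (by omega)
          exact hcond (lt_of_le_of_lt h4 h3)
        exact ih (hi - ((lo + hi) / 2 + 1)) (by omega) _ hi rfl hhi hff hhi'
    · omega

-- nonemptiness is preserved by aInsert
theorem aInsert_ne (p : Int × Int) (G : List (List (Int × Int)))
    (h : ∀ g ∈ G, g ≠ []) : ∀ g ∈ aInsert p G, g ≠ [] := by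
  induction G with
  | nil => simp [aInsert]
  | cons g gs ih =>
    simp only [aInsert]
    split
    · intro g' hg'
      rcases hg' with _ | h'
      · simp
      · exact h _ (List.mem_cons_of_mem _ (by assumption))
    · intro g' hg'
      rcases hg' with _ | h'
      · exact h g (List.mem_cons_self ..)
      · exact ih (fun g hg => h g (List.mem_cons_of_mem _ hg)) g' (by assumption)

-- every last qarg after aInsert is p.2 or an old last qarg
theorem lastQ_mem_aInsert (p : Int × Int) (G : List (List (Int × Int))) :
    ∀ g ∈ aInsert p G, lastQ g = p.2 ∨ ∃ g' ∈ G, lastQ g = lastQ g' := by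
  induction G with
  | nil => simp [aInsert, lastQ]
  | cons g gs ih =>
    simp only [aInsert]
    split
    · intro g' hg'
      rcases hg' with _ | h'
      · left; simp [lastQ, List.getLastD_concat]
      · right; exact ⟨g', List.mem_cons_of_mem _ (by assumption), rfl⟩
    · intro g' hg'
      rcases hg' with _ | h'
      · right; exact ⟨g, List.mem_cons_self .., rfl⟩
      · rcases ih g' (by assumption) with h | ⟨g'', hg'', he⟩
        · left; exact h
        · right; exact ⟨g'', List.mem_cons_of_mem _ hg'', he⟩

-- the non-increasing invariant is preserved
theorem aInsert_pairwise (p : Int × Int) (G : List (List (Int × Int)))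
    (h : G.Pairwise (fun a b => lastQ b ≤ lastQ a)) :
    (aInsert p G).Pairwise (fun a b => lastQ b ≤ lastQ a) := by
  induction G with
  | nil => simp [aInsert]
  | cons g gs ih =>
    rcases List.pairwise_cons.mp h with ⟨hg, hgs⟩
    simp only [aInsert]
    split
    · rename_i hc
      refine List.pairwise_cons.mpr ⟨?_, hgs⟩
      intro b hb
      have : lastQ (g ++ [p]) = p.2 := by simp [lastQ, List.getLastD_concat]
      rw [this]
      exact le_of_lt (lt_of_le_of_lt (hg b hb) hc)
    · rename_i hc
      refine List.pairwise_cons.mpr ⟨?_, ih hgs⟩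
      intro b hb
      rcases lastQ_mem_aInsert p gs b hb with he | ⟨g', hg', he⟩
      · rw [he]; exact not_lt.mp hc
      · rw [he]; exact hg g' hg'

-- aInsert, seen through absG/lastsG, is exactly bStep's branch on ff
theorem absG_aInsert (p : Int × Int) (G : List (List (Int × Int))) (hne : ∀ g ∈ G, g ≠ []) :
    absG (aInsert p G) =
      (if ff p.2 (lastsG G) = (lastsG G).length then absG G ++ [([p.1], [p.2])]
       else (absG G).modify (ff p.2 (lastsG G)) (fun g => (g.1 ++ [p.1], g.2 ++ [p.2]))) ∧
    lastsG (aInsert p G) =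
      (if ff p.2 (lastsG G) = (lastsG G).length then lastsG G ++ [p.2]
       else (lastsG G).set (ff p.2 (lastsG G)) p.2) := by
  induction G with
  | nil => simp [aInsert, absG, lastsG, ff, lastQ]
  | cons g gs ih =>
    rcases ih (fun g' hg' => hne g' (List.mem_cons_of_mem _ hg')) with ⟨ih1, ih2⟩
    have hg : lastsG (g :: gs) = lastQ g :: lastsG gs := rfl
    by_cases hc : lastQ g < p.2
    · have hff : ff p.2 (lastsG (g :: gs)) = 0 := by rw [hg]; simp [ff, hc]
      have hA : aInsert p (g :: gs) = (g ++ [p]) :: gs := by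
        simp only [aInsert]; exact if_pos hc
      constructor
      · rw [hA, hff, if_neg (by rw [hg]; simp)]
        show ((g ++ [p]).map Prod.fst, (g ++ [p]).map Prod.snd) :: absG gs =
          (absG (g :: gs)).modify 0 (fun g => (g.1 ++ [p.1], g.2 ++ [p.2]))
        have h0 : absG (g :: gs) = (g.map Prod.fst, g.map Prod.snd) :: absG gs := rfl
        rw [h0, List.modify_zero_cons]
        simp
      · rw [hA, hff, if_neg (by rw [hg]; simp)]
        show lastQ (g ++ [p]) :: lastsG gs = (lastsG (g :: gs)).set 0 p.2
        rw [hg]; simp [lastQ, List.getLastD_concat]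
    · have hA : aInsert p (g :: gs) = g :: aInsert p gs := by
        simp only [aInsert]; exact if_neg hc
      have hff : ff p.2 (lastsG (g :: gs)) = ff p.2 (lastsG gs) + 1 := by
        rw [hg]; simp [ff, hc]
      have hlen : (lastsG (g :: gs)).length = (lastsG gs).length + 1 := by
        rw [hg, List.length_cons]
      constructor
      · rw [hA, hff]
        by_cases he : ff p.2 (lastsG gs) = (lastsG gs).length
        · rw [if_pos (by omega)]
          show (g.map Prod.fst, g.map Prod.snd) :: absG (aInsert p gs) =
            absG (g :: gs) ++ [([p.1], [p.2])]
          rw [ih1, if_pos he]; rfl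
        · rw [if_neg (by omega)]
          show (g.map Prod.fst, g.map Prod.snd) :: absG (aInsert p gs) =
            (absG (g :: gs)).modify (ff p.2 (lastsG gs) + 1)
              (fun g => (g.1 ++ [p.1], g.2 ++ [p.2]))
          have h0 : absG (g :: gs) = (g.map Prod.fst, g.map Prod.snd) :: absG gs := rfl
          rw [h0, List.modify_succ_cons, ih1, if_neg he]
      · rw [hA, hff]
        by_cases he : ff p.2 (lastsG gs) = (lastsG gs).length
        · rw [if_pos (by omega)]
          show lastQ g :: lastsG (aInsert p gs) = lastsG (g :: gs) ++ [p.2]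
          rw [ih2, if_pos he, hg]; rfl
        · rw [if_neg (by omega)]
          show lastQ g :: lastsG (aInsert p gs) = (lastsG (g :: gs)).set (ff p.2 (lastsG gs) + 1) p.2
          rw [ih2, if_neg he, hg, List.set_cons_succ]

-- one step of B matches one step of A under the invariant
theorem step_eq (p : Int × Int) (G : List (List (Int × Int))) (hinv : invG G) :
    bStep (absG G, lastsG G) p = (absG (aInsert p G), lastsG (aInsert p G)) := by
  rcases hinv with ⟨hne, hpw⟩
  have hpl : (lastsG G).Pairwise (fun a b => b ≤ a) := by
    simpa [lastsG, List.pairwise_map] using hpw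
  have hb : bSearch (lastsG G) p.2 0 (lastsG G).length = ff p.2 (lastsG G) :=
    bSearch_eq (lastsG G) p.2 hpl _ 0 (lastsG G).length rfl le_rfl (Nat.zero_le _)
      (ff_le p.2 (lastsG G))
  rcases absG_aInsert p G hne with ⟨h1, h2⟩
  simp only [bStep, hb, h1, h2]
  split <;> rfl

theorem invG_aInsert (p : Int × Int) (G : List (List (Int × Int))) (h : invG G) :
    invG (aInsert p G) :=
  ⟨aInsert_ne p G h.1, aInsert_pairwise p G h.2⟩

theorem fold_eq (ps : List (Int × Int)) :
    ∀ G, invG G →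
      ps.foldl bStep (absG G, lastsG G) =
        (absG (ps.foldl (fun gs p => aInsert p gs) G),
         lastsG (ps.foldl (fun gs p => aInsert p gs) G)) := by
  induction ps with
  | nil => intro G _; rfl
  | cons p ps ih =>
    intro G hinv
    simp only [List.foldl_cons]
    rw [step_eq p G hinv]
    exact ih (aInsert p G) (invG_aInsert p G hinv)

-- ===== VERDICT (by name: the statement is the Claim_ definition above) =====
theorem deconflict_spec : Claim_equal_deconflict := by
  intro ctrls qargs _
  unfold Spec_deconflict
  have h := fold_eq (PySem.List.sorted2 (List.zip ctrls qargs) Prod.fst Prod.snd) []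
    ⟨by simp, by simp⟩
  simp only [absG, lastsG, List.map_nil] at h
  simp only [deconflict, deconflict_alt, h]
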